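-- pv_equiv track=rewrite | github.com/pypi-data/pypi-mirror-391 | packages/cellarc/cellarc-0.1.1.tar.gz/cellarc-0.1.1/scripts/plots/export_basic_dataset_properties_tex.py | _format_family_label
-- ===== SOURCE A (Python) =====
-- from typing import Dict, Iterable, List, Tuple
--
-- def _format_family_label(name: str) -> str:
--     if not name:
--         return "Unknown"
--     cleaned = str(name).strip().replace("_", " ")
--     tokens = cleaned.split()
--     result: List[str] = []
--     i = 0
--     while i < len(tokens):
--         token = tokens[i].lower()
--         next_token = tokens[i + 1].lower() if i + 1 < len(tokens) else None
--         if token == "mod" and next_token in {"k", "(k)"}: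
--             result.append("mod(k)")
--             i += 2
--             continue
--         if token.endswith("(k)"):
--             result.append(token)
--         elif token in {"ca", "io"}:
--             result.append(token.upper())
--         else:
--             result.append(token.capitalize())
--         i += 1
--     return " ".join(result)
-- ===== SOURCE B (Python) =====
-- def _merge(tokens):
--     if not tokens:
--         return []
--     if tokens[0].lower() == "mod" and len(tokens) > 1 and tokens[1].lower() in ("k", "(k)"):
--         return ["mod(k)"] + _merge(tokens[2:])
--     return [tokens[0].lower()] + _merge(tokens[1:])
--
--
-- def _fmt(t):
--     if t.endswith("(k)"):
--         return t
--     if t in ("ca", "io"):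
--         return t.upper()
--     return t.capitalize()
--
--
-- def _format_family_label(name: str) -> str:
--     if not name:
--         return "Unknown"
--     tokens = name.strip().replace("_", " ").split()
--     return " ".join(_fmt(t) for t in _merge(tokens))
-- ===== Notes on version B (the rewrite author's own statement) =====
-- stated objective: simpler
-- what changed: A's single fused lookahead while-loop (index stepping by one or two with formatting inline) is split into a recursive merge pass that lowercases tokens and fuses the modulus keyword with its parameter token, followed by a stateless per-token format map.
import Mathlib
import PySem

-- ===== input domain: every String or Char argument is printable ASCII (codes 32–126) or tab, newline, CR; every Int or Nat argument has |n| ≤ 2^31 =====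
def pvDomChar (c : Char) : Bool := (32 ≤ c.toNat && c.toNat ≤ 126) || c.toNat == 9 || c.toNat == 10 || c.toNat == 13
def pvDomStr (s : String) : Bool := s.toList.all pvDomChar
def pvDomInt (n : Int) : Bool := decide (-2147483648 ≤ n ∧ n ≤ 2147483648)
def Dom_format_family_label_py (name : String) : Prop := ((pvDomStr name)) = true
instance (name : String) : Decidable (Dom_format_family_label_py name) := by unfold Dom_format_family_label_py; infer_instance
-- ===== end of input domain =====

-- B splits A's fused lookahead loop into a merge pass plus a stateless per-token format map (objective: simpler decomposition; same cost).


-- Python str.capitalize() (ASCII): uppercase the first character, lowercase the rest. Exact on the ASCII domain.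
def pyCapitalize (s : String) : String :=
  match s.toList with
  | [] => ""
  | c :: cs => String.ofList (PySem.Chars.upperChar c :: PySem.Chars.lower cs)

-- ===== PORT A =====
-- A's while loop over index i, advancing by 1 or 2, as structural recursion on the remaining tokens.
def formatLoopA : List String → List String
  | [] => []
  | t :: rest =>
    let token := PySem.Str.lower t
    let next : Option String := match rest with | [] => none | n :: _ => some (PySem.Str.lower n)
    if token == "mod" && (next == some "k" || next == some "(k)") then
      "mod(k)" :: formatLoopA (rest.drop 1)
    else if PySem.Str.endswith token "(k)" then
      token :: formatLoopA rest
    else if token == "ca" || token == "io" then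
      PySem.Str.upper token :: formatLoopA rest
    else
      pyCapitalize token :: formatLoopA rest
  termination_by ts => ts.length
  decreasing_by all_goals simp

def format_family_label_py (name : String) : String :=
  if name == "" then "Unknown"
  else
    let cleaned := PySem.Str.replace (PySem.Str.strip name) "_" " "
    let tokens := PySem.Str.split₀ cleaned
    PySem.Str.join " " (formatLoopA tokens)

-- ===== PORT B =====
-- merge pass: lowercase every token, fusing "mod" + "k"/"(k)" into "mod(k)"
def mergeB : List String → List String
  | [] => []
  | t :: rest =>
    if PySem.Str.lower t == "mod" &&
        (match rest with
         | [] => false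
         | n :: _ => PySem.Str.lower n == "k" || PySem.Str.lower n == "(k)") then
      "mod(k)" :: mergeB (rest.drop 1)
    else
      PySem.Str.lower t :: mergeB rest
  termination_by ts => ts.length
  decreasing_by all_goals simp

-- stateless format pass over an already-lowercased token
def fmtB (t : String) : String :=
  if PySem.Str.endswith t "(k)" then t
  else if t == "ca" || t == "io" then PySem.Str.upper t
  else pyCapitalize t

def format_family_label_py_alt (name : String) : String :=
  if name == "" then "Unknown"
  else
    let tokens := PySem.Str.split₀ (PySem.Str.replace (PySem.Str.strip name) "_" " ")
    PySem.Str.join " " ((mergeB tokens).map fmtB)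

-- ===== PRECONDITION & SPEC =====
def Spec_format_family_label_py (name : String) (out : String) : Prop := out = format_family_label_py_alt name
instance (name : String) (out : String) : Decidable (Spec_format_family_label_py name out) := by unfold Spec_format_family_label_py; infer_instance

-- ===== CLAIM (what is proved, stated in full; the proofs are below) =====
def Claim_equal_format_family_label_py : Prop := ∀ (name : String), Dom_format_family_label_py name → Spec_format_family_label_py name (format_family_label_py name)

-- ===== LEMMAS AND PROOFS =====
theorem fmtB_modk : fmtB "mod(k)" = "mod(k)" := by decide

theorem loop_eq_merge_map_aux : ∀ (n : Nat) (ts : List String), ts.length ≤ n →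
    formatLoopA ts = (mergeB ts).map fmtB := by
  intro n
  induction n with
  | zero =>
      intro ts h
      have : ts = [] := List.eq_nil_of_length_eq_zero (Nat.le_zero.mp h)
      subst this
      simp [formatLoopA, mergeB]
  | succ n ih =>
      intro ts h
      match ts with
      | [] => simp [formatLoopA, mergeB]
      | t :: rest =>
        rw [formatLoopA.eq_def, mergeB.eq_def]
        simp only []
        cases rest with
        | nil =>
            simp only [List.drop, List.map]
            by_cases h1 : PySem.Str.endswith (PySem.Str.lower t) "(k)" <;>
            by_cases h2 : (PySem.Str.lower t == "ca" || PySem.Str.lower t == "io") = true <;>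
            simp [fmtB, h1, h2, formatLoopA, mergeB] <;> split <;> simp_all
        | cons nx r2 =>
            have e1 : ((some (PySem.Str.lower nx) == some "k" || some (PySem.Str.lower nx) == some "(k)"))
                = ((PySem.Str.lower nx == "k" || PySem.Str.lower nx == "(k)")) := rfl
            rw [e1]
            by_cases hc : (PySem.Str.lower t == "mod" &&
                (PySem.Str.lower nx == "k" || PySem.Str.lower nx == "(k)")) = true
            · rw [if_pos hc, if_pos hc]
              simp only [List.drop, List.map]
              rw [ih r2 (by simp at h; omega), fmtB_modk]
            · rw [if_neg hc, if_neg hc]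
              rw [ih (nx :: r2) (by simp at h ⊢; omega)]
              simp only [List.map]
              by_cases h1 : PySem.Str.endswith (PySem.Str.lower t) "(k)" <;>
              by_cases h2 : (PySem.Str.lower t == "ca" || PySem.Str.lower t == "io") = true <;>
              simp [fmtB, h1, h2] <;> split <;> simp_all

theorem loop_eq_merge_map (ts : List String) : formatLoopA ts = (mergeB ts).map fmtB :=
  loop_eq_merge_map_aux ts.length ts le_rfl

theorem format_family_label_py_spec : Claim_equal_format_family_label_py := by
  intro name _
  unfold Spec_format_family_label_py format_family_label_py format_family_label_py_alt
  split
  · rfl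
  · simp [loop_eq_merge_map]
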